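-- pv_equiv track=rewrite | github.com/courtois-neuromod/shinobi | code/annotations/generate_annotations.py | fix_position_resets
-- ===== SOURCE A (Python) =====
-- def fix_position_resets(X_player):
--     """Sometimes X_player resets to 0 but the player's position should keep
--     increasing.
--     This fixes it and makes sure that X_player is continuous. If not, the
--     values after the jump are corrected.
--
--     Parameters
--     ----------
--     X_player : list
--         List of raw positions at each timeframe from one repetition.
--
--     Returns
--     -------
--     list
--         List of lists of fixed (continuous) positions. One per repetition.
--
--     """
--
--     fixed_X_player = []
--     raw_X_player = X_player
--     fix = 0  # keeps trace of the shift
--     fixed_X_player.append(raw_X_player[0])  # add first frame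
--     for i in range(1, len(raw_X_player) - 1):  # ignore first and last frames
--         if raw_X_player[i - 1] - raw_X_player[i] > 100:
--             fix += raw_X_player[i - 1] - raw_X_player[i]
--         fixed_X_player.append(raw_X_player[i] + fix)
--     fixed_X_player.append(fixed_X_player[-1]) # re-add the last frame for consistency
--     return fixed_X_player
-- ===== SOURCE B (Python) =====
-- def fix_position_resets(X_player):
--     # Two-pass rewrite: build a prefix-sum offset table (fixes) from adjacent
--     # raw jumps, then apply it to the middle frames; equivalent return value.
--     n = len(X_player)
--     prevs = X_player[0:n - 2]
--     mids = X_player[1:n - 1]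
--     jumps = [p - m if p - m > 100 else 0 for p, m in zip(prevs, mids)]
--     fixes = []
--     s = 0
--     for j in jumps:
--         s += j
--         fixes.append(s)
--     fixed = [X_player[0]] + [m + f for m, f in zip(mids, fixes)]
--     fixed.append(fixed[-1])
--     return fixed
-- ===== Notes on version B (the rewrite author's own statement) =====
-- stated objective: alternative
-- what changed: Replaces A's single fused loop (which carries a running shift while emitting corrected frames) with a two-pass decomposition: first build a prefix-sum offset table from the adjacent-pair jumps, then apply the offsets to the middle frames by zipping.
import Mathlib
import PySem

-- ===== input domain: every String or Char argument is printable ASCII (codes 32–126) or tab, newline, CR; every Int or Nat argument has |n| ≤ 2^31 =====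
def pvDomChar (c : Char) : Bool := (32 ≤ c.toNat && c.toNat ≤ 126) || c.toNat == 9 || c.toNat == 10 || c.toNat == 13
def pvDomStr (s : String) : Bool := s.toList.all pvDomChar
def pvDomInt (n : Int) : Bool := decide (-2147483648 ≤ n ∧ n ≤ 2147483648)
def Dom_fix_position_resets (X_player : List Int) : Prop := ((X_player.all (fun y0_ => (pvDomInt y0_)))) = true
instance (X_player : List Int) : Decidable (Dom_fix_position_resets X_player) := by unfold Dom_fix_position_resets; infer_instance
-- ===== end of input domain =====

-- B replaces A's fused incremental loop by two passes — a prefix-sum offset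
-- table built from adjacent jumps, then applied to the middle frames
-- (objective: alternative decomposition; same return value).

-- ===== PORT A =====
def fix_position_resets (X_player : List Int) : List Int :=
  -- fixed_X_player = [X_player[0]]; for i in range(1, len-1): …; append fixed[-1]
  let fixed0 : List Int := [PySem.List.pyGetD X_player 0 0]
  let st :=
    (PySem.List.pyRange 1 ((X_player.length : Int) - 1) 1).foldl
      (fun (st : List Int × Int) i =>
        let prev := PySem.List.pyGetD X_player (i - 1) 0
        let cur := PySem.List.pyGetD X_player i 0
        let fix := if prev - cur > 100 then st.2 + (prev - cur) else st.2
        (st.1 ++ [cur + fix], fix))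
      (fixed0, 0)
  st.1 ++ [PySem.List.pyGetD st.1 (-1) 0]

-- ===== PORT B =====
def fix_position_resets_alt (X_player : List Int) : List Int :=
  let n : Int := X_player.length
  let prevs := PySem.List.slice X_player (some 0) (some (n - 2))
  let mids := PySem.List.slice X_player (some 1) (some (n - 1))
  let jumps := (prevs.zip mids).map
    (fun pm => if pm.1 - pm.2 > 100 then pm.1 - pm.2 else 0)
  let fixes :=
    (jumps.foldl (fun (st : List Int × Int) j => (st.1 ++ [st.2 + j], st.2 + j)) ([], 0)).1
  let fixed := PySem.List.pyGetD X_player 0 0 ::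
    (mids.zip fixes).map (fun mf => mf.1 + mf.2)
  fixed ++ [PySem.List.pyGetD fixed (-1) 0]

-- ===== PRECONDITION & SPEC =====
-- Pre_ excludes only the empty list, on which A raises IndexError (X_player[0]).
def Pre_fix_position_resets (X_player : List Int) : Prop := X_player ≠ []
instance (X_player : List Int) : Decidable (Pre_fix_position_resets X_player) := by
  unfold Pre_fix_position_resets; infer_instance
def pvWitness_fix_position_resets : List Int := [5, 200, 50, 60]

def Spec_fix_position_resets (X_player : List Int) (out : List Int) : Prop := out = fix_position_resets_alt X_player
instance (X_player : List Int) (out : List Int) : Decidable (Spec_fix_position_resets X_player out) := by unfold Spec_fix_position_resets; infer_instance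

-- ===== CLAIM (what is proved, stated in full; the proofs are below) =====
def Claim_equal_fix_position_resets : Prop := ∀ (X_player : List Int), Dom_fix_position_resets X_player → Pre_fix_position_resets X_player → Spec_fix_position_resets X_player (fix_position_resets X_player)

-- ===== LEMMAS AND PROOFS =====

/-- One loop step of A, on a (prev, cur) pair. -/
def stepP (st : List Int × Int) (pc : Int × Int) : List Int × Int :=
  let f := if pc.1 - pc.2 > 100 then st.2 + (pc.1 - pc.2) else st.2
  (st.1 ++ [pc.2 + f], f)

/-- Middle frames produced from offset `f` over adjacent pairs. -/
def applyPS (f : Int) : List (Int × Int) → List Int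
  | [] => []
  | pc :: t =>
      let f' := if pc.1 - pc.2 > 100 then f + (pc.1 - pc.2) else f
      (pc.2 + f') :: applyPS f' t

/-- Prefix sums starting from `s`. -/
def preSums (s : Int) : List Int → List Int
  | [] => []
  | j :: t => (s + j) :: preSums (s + j) t

lemma foldl_stepP (ps : List (Int × Int)) : ∀ acc f,
    (ps.foldl stepP (acc, f)).1 = acc ++ applyPS f ps := by
  induction ps with
  | nil => simp [applyPS]
  | cons pc t ih =>
      intro acc f
      simp only [List.foldl_cons, stepP, applyPS, ih]
      simp

lemma foldl_preSums (js : List Int) : ∀ (acc : List Int) (s : Int),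
    (js.foldl (fun (st : List Int × Int) j => (st.1 ++ [st.2 + j], st.2 + j)) (acc, s)).1
      = acc ++ preSums s js := by
  induction js with
  | nil => simp [preSums]
  | cons j t ih =>
      intro acc s
      simp only [List.foldl_cons, preSums, ih]
      simp

lemma zip_preSums (ps : List (Int × Int)) : ∀ f : Int,
    ((ps.map Prod.snd).zip
        (preSums f (ps.map (fun pc => if pc.1 - pc.2 > 100 then pc.1 - pc.2 else 0)))).map
      (fun mf : Int × Int => mf.1 + mf.2)
      = applyPS f ps := by
  induction ps with
  | nil => simp [preSums, applyPS]
  | cons pc t ih =>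
      intro f
      simp only [List.map_cons, preSums, List.zip_cons_cons, applyPS, ih]
      congr 1
      · split <;> ring
      · congr 1
        split <;> simp

lemma A_fold (X : List Int) (st : List Int × Int) : ∀ m : Nat, m ≤ X.length →
    (PySem.List.pyRange 1 (m : Int) 1).foldl
        (fun (st : List Int × Int) i =>
          stepP st (PySem.List.pyGetD X (i - 1) 0, PySem.List.pyGetD X i 0)) st
      = ((X.zip X.tail).take (m - 1)).foldl stepP st := by
  intro m
  induction m generalizing st with
  | zero => simp [PySem.List.pyRange_one_eq_nil]
  | succ m ih =>
      intro hm
      rcases Nat.eq_zero_or_pos m with hm0 | hm0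
      · subst hm0
        simp [PySem.List.pyRange_one_eq_nil]
      · have h1 : (1 : Int) ≤ (m : Int) := by exact_mod_cast hm0
        have hrange : PySem.List.pyRange 1 ((m : Int) + 1) 1
            = PySem.List.pyRange 1 (m : Int) 1 ++ [(m : Int)] :=
          PySem.List.pyRange_one_succ_right h1
        have hmlt : m < X.length := hm
        have hm1lt : m - 1 < (X.zip X.tail).length := by
          simp [List.length_zip, List.length_tail]
          omega
        have htake : (X.zip X.tail).take m
            = (X.zip X.tail).take (m - 1) ++ [(X.zip X.tail)[m - 1]] := by
          have hm' : m = (m - 1) + 1 := by omega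
          conv_lhs => rw [hm']
          rw [List.take_add_one, List.getElem?_eq_getElem hm1lt]
          simp
        have hzget : (X.zip X.tail)[m - 1] = (X[m - 1]'(by omega), X[m]'hmlt) := by
          have := List.getElem_zip (l := X) (l' := X.tail) (i := m - 1) (h := hm1lt)
          rw [this]
          congr 1
          rw [List.getElem_tail]
          congr 1
          omega
        have hprev : PySem.List.pyGetD X ((m : Int) - 1) 0 = X[m - 1]'(by omega) := by
          rw [PySem.List.pyGetD_eq_getElem X 0 (by omega) (by omega)]
          congr 1
          omega
        have hcur : PySem.List.pyGetD X (m : Int) 0 = X[m]'hmlt := by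
          rw [PySem.List.pyGetD_eq_getElem X 0 (by omega) (by omega)]
          congr 1
        push_cast
        rw [hrange, List.foldl_append, ih st (by omega), htake, List.foldl_append]
        simp [hzget, hprev, hcur]

lemma main_case (x y : Int) (ys : List Int) :
    fix_position_resets (x :: y :: ys) = fix_position_resets_alt (x :: y :: ys) := by
  have hlen1 : (((x :: y :: ys).length : Int)) - 1 = ((ys.length + 1 : Nat) : Int) := by
    simp only [List.length_cons]; push_cast; omega
  have hlen2 : (((x :: y :: ys).length : Int)) - 2 = ((ys.length : Nat) : Int) := by
    simp only [List.length_cons]; push_cast; omega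
  have hA := A_fold (x :: y :: ys) ([PySem.List.pyGetD (x :: y :: ys) 0 0], 0)
      (ys.length + 1) (by simp)
  simp only [stepP] at hA
  have hzip : ((x :: y :: ys).take ys.length).zip (((x :: y :: ys).tail).take ys.length)
      = ((x :: y :: ys).zip (x :: y :: ys).tail).take ys.length := by
    rw [List.zip_eq_zipWith, List.zip_eq_zipWith, List.take_zipWith]
  simp only [fix_position_resets, fix_position_resets_alt]
  rw [hlen1, hlen2, hA]
  simp only [Nat.add_sub_cancel, foldl_stepP]
  have hprevs : PySem.List.slice (x :: y :: ys) (some 0) (some ((ys.length : Nat) : Int))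
      = (x :: y :: ys).take ys.length := by
    rw [PySem.List.slice_zero_start, PySem.List.slice_to_natCast]
  have hmids : PySem.List.slice (x :: y :: ys) (some 1) (some ((ys.length + 1 : Nat) : Int))
      = ((x :: y :: ys).tail).take ys.length := by
    simpa using PySem.List.slice_natCast (x :: y :: ys) 1 (ys.length + 1)
  have hm : ((x :: y :: ys).tail).take ys.length
      = (List.take ys.length ((x :: y :: ys).zip (x :: y :: ys).tail)).map Prod.snd := by
    rw [← hzip]
    symm
    apply List.map_snd_zip
    simp
    omega
  rw [hprevs, hmids, hzip, foldl_preSums, hm]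
  simp only [List.nil_append]
  rw [zip_preSums]
  simp

-- ===== VERDICT (by name: the statement is the Claim_ definition above) =====
theorem fix_position_resets_spec : Claim_equal_fix_position_resets := by
  intro X hDom hPre
  unfold Spec_fix_position_resets
  match X, hPre with
  | [x], _ => rfl
  | x :: y :: ys, _ => exact main_case x y ys
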